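-- pv_equiv track=rewrite | github.com/nvierass/PINGESO---Proyecto-ECCA | Vistas/VistaMalla.py | ajustarNombreAsignatura
-- ===== SOURCE A (Python) =====
-- def ajustarNombreAsignatura(nombre):
--     largo = len(nombre.split())
--     if(largo > 4):
--         lista = nombre.split()
--         lista.insert(2, "\n")
--         lista.insert(4, "\n")
--         aux = ""
--         for i in range(0,len(lista)):
--             aux += lista[i]
--             if(i != len(lista)-1 and i != 2 and i != 4):
--                 aux += " "
--         return aux
--
--     elif(largo > 2):
--         lista = nombre.split()
--         lista.insert(2, "\n")
--         aux = ""
--         for i in range(0,len(lista)):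
--             aux += lista[i]
--             if(i != len(lista)-1 and i != 2):
--                 aux += " "
--         return aux
--
--     return nombre
-- ===== SOURCE B (Python) =====
-- def ajustarNombreAsignatura(nombre):
--     words = nombre.split()
--     if len(words) > 4:
--         return " ".join(words[:2]) + " \n" + words[2] + " \n" + " ".join(words[3:])
--     if len(words) > 2:
--         return " ".join(words[:2]) + " \n" + " ".join(words[2:])
--     return nombre
-- ===== Notes on version B (the rewrite author's own statement) =====
-- stated objective: simpler
-- what changed: B splits once and builds each result directly by slicing and space-joining word-list slices, replacing A's sentinel-insertion into the word list followed by an index-conditional character-accumulation loop.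
import Mathlib
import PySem

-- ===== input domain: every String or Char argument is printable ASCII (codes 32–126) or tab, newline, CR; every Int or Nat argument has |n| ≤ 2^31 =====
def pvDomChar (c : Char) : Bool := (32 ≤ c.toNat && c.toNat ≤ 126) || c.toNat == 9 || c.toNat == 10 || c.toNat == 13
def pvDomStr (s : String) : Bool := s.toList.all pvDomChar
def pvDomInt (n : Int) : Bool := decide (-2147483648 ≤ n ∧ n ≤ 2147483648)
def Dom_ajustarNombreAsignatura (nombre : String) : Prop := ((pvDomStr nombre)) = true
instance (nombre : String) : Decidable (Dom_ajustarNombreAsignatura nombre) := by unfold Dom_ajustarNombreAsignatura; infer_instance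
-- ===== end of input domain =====

-- B replaces A's sentinel-insertion plus index-conditional character loop by direct slicing and joins; objective: simpler.

-- ===== PORT A =====
-- the 'for i in range(0,len(lista))' accumulation loop of the largo>4 branch (pyGet? never misses: i is in range)
def pvLoopA5 (lista : List (List Char)) : List Char :=
  (PySem.List.pyRange 0 (lista.length : Int) 1).foldl
    (fun aux i =>
      if i ≠ (lista.length : Int) - 1 ∧ i ≠ 2 ∧ i ≠ 4 then
        (aux ++ (PySem.List.pyGet? lista i).getD []) ++ [' ']
      else aux ++ (PySem.List.pyGet? lista i).getD []) []

-- the accumulation loop of the largo>2 branch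
def pvLoopA3 (lista : List (List Char)) : List Char :=
  (PySem.List.pyRange 0 (lista.length : Int) 1).foldl
    (fun aux i =>
      if i ≠ (lista.length : Int) - 1 ∧ i ≠ 2 then
        (aux ++ (PySem.List.pyGet? lista i).getD []) ++ [' ']
      else aux ++ (PySem.List.pyGet? lista i).getD []) []

def ajustarNombreAsignatura (nombre : String) : String :=
  let largo := (PySem.Chars.split₀ nombre.toList).length
  if largo > 4 then
    let lista := PySem.Chars.split₀ nombre.toList
    let lista := PySem.List.insert lista 2 ['\n']
    let lista := PySem.List.insert lista 4 ['\n']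
    String.ofList (pvLoopA5 lista)
  else if largo > 2 then
    let lista := PySem.Chars.split₀ nombre.toList
    let lista := PySem.List.insert lista 2 ['\n']
    String.ofList (pvLoopA3 lista)
  else nombre

-- ===== PORT B =====
def ajustarNombreAsignatura_alt (nombre : String) : String :=
  let words := PySem.Chars.split₀ nombre.toList
  if words.length > 4 then
    String.ofList (PySem.Chars.join [' '] (PySem.List.slice words none (some 2))
      ++ [' ', '\n'] ++ (PySem.List.pyGet? words 2).getD []
      ++ [' ', '\n'] ++ PySem.Chars.join [' '] (PySem.List.slice words (some 3) none))
  else if words.length > 2 then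
    String.ofList (PySem.Chars.join [' '] (PySem.List.slice words none (some 2))
      ++ [' ', '\n'] ++ PySem.Chars.join [' '] (PySem.List.slice words (some 2) none))
  else nombre

-- ===== PRECONDITION & SPEC =====
def Spec_ajustarNombreAsignatura (nombre : String) (out : String) : Prop := out = ajustarNombreAsignatura_alt nombre
instance (nombre : String) (out : String) : Decidable (Spec_ajustarNombreAsignatura nombre out) := by unfold Spec_ajustarNombreAsignatura; infer_instance

-- ===== CLAIM (what is proved, stated in full; the proofs are below) =====
def Claim_equal_ajustarNombreAsignatura : Prop := ∀ (nombre : String), Dom_ajustarNombreAsignatura nombre → Spec_ajustarNombreAsignatura nombre (ajustarNombreAsignatura nombre)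

-- ===== LEMMAS AND PROOFS =====

-- the tail of the >4 loop, from an index k = pre.length ≥ 5 on: only the "last index" test matters,
-- and the loop produces exactly the space-joined suffix
theorem pvLoopA5_tail (l d pre : List (List Char)) (acc : List Char) (k : Int)
    (hl : l = pre ++ d) (h5 : 5 ≤ pre.length) (hk : k = (pre.length : Int)) :
    (PySem.List.pyRange k (l.length : Int) 1).foldl
      (fun aux i =>
        if i ≠ (l.length : Int) - 1 ∧ i ≠ 2 ∧ i ≠ 4 then
          (aux ++ (PySem.List.pyGet? l i).getD []) ++ [' ']
        else aux ++ (PySem.List.pyGet? l i).getD []) acc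
      = acc ++ PySem.Chars.join [' '] d := by
  subst hk
  induction d generalizing pre acc with
  | nil =>
    subst hl
    rw [PySem.List.pyRange_one_eq_nil (by simp)]
    simp [PySem.Chars.join_nil]
  | cons x xs ih =>
    subst hl
    have hlen : ((pre ++ x :: xs).length : Int) = (pre.length : Int) + xs.length + 1 := by
      simp; omega
    rw [PySem.List.pyRange_one_cons (by omega)]
    rw [List.foldl_cons]
    rw [PySem.List.pyGet?_append_length _ _ _]
    simp only [Option.getD_some]
    rcases xs with _ | ⟨y, ys⟩
    · -- last element: condition is false, tail range is empty
      simp only [List.length_nil, Nat.cast_zero] at hlen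
      rw [if_neg (by omega)]
      rw [PySem.List.pyRange_one_eq_nil (by simp)]
      simp [PySem.Chars.join_singleton]
    · -- not last: condition holds (index ≥ 5 so ≠ 2 and ≠ 4, and it is not the last)
      rw [if_pos ⟨by simp; omega, by omega, by omega⟩]
      have := ih (pre ++ [x]) ((acc ++ x) ++ [' ']) (by simp) (by simp; omega)
      rw [show ((pre.length : Int) + 1) = (((pre ++ [x]).length : Int)) by simp]
      rw [this, PySem.Chars.join_cons_cons]
      simp

theorem pv_range6 : PySem.List.pyRange 0 6 1 = [0, 1, 2, 3, 4, 5] := by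
  rw [PySem.List.pyRange_one_cons (by norm_num), PySem.List.pyRange_one_cons (by norm_num),
    PySem.List.pyRange_one_cons (by norm_num), PySem.List.pyRange_one_cons (by norm_num),
    PySem.List.pyRange_one_cons (by norm_num), PySem.List.pyRange_one_cons (by norm_num),
    PySem.List.pyRange_one_eq_nil (by norm_num)]
  norm_num

theorem pv_loopA5_eval (w0 w1 w2 w3 w4 : List Char) (rest : List (List Char)) :
    pvLoopA5 (w0 :: w1 :: ['\n'] :: w2 :: ['\n'] :: w3 :: w4 :: rest)
      = w0 ++ [' '] ++ w1 ++ [' ', '\n'] ++ w2 ++ [' ', '\n'] ++ w3 ++ [' ']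
        ++ PySem.Chars.join [' '] (w4 :: rest) := by
  unfold pvLoopA5
  rw [PySem.List.pyRange_one_append 0 6 _ (by norm_num) (by simp; omega)]
  rw [List.foldl_append, pv_range6]
  simp only [List.foldl_cons, List.foldl_nil]
  have L : ((w0 :: w1 :: ['\n'] :: w2 :: ['\n'] :: w3 :: w4 :: rest).length : Int)
      = (rest.length : Int) + 7 := by simp; omega
  simp only [L]
  have t0 : ((0:Int) ≠ (rest.length : Int) + 7 - 1 ∧ (0:Int) ≠ 2 ∧ (0:Int) ≠ 4) :=
    ⟨by omega, by norm_num, by norm_num⟩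
  have t1 : ((1:Int) ≠ (rest.length : Int) + 7 - 1 ∧ (1:Int) ≠ 2 ∧ (1:Int) ≠ 4) :=
    ⟨by omega, by norm_num, by norm_num⟩
  have n2 : ¬((2:Int) ≠ (rest.length : Int) + 7 - 1 ∧ (2:Int) ≠ 2 ∧ (2:Int) ≠ 4) := by
    intro h; exact h.2.1 rfl
  have t3 : ((3:Int) ≠ (rest.length : Int) + 7 - 1 ∧ (3:Int) ≠ 2 ∧ (3:Int) ≠ 4) :=
    ⟨by omega, by norm_num, by norm_num⟩
  have n4 : ¬((4:Int) ≠ (rest.length : Int) + 7 - 1 ∧ (4:Int) ≠ 2 ∧ (4:Int) ≠ 4) := by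
    intro h; exact h.2.2 rfl
  have t5 : ((5:Int) ≠ (rest.length : Int) + 7 - 1 ∧ (5:Int) ≠ 2 ∧ (5:Int) ≠ 4) :=
    ⟨by omega, by norm_num, by norm_num⟩
  rw [if_pos t0, if_pos t1, if_neg n2, if_pos t3, if_neg n4, if_pos t5]
  have e0 : PySem.List.pyGet? (w0 :: w1 :: ['\n'] :: w2 :: ['\n'] :: w3 :: w4 :: rest) (0:Int) = some w0 := by
    rw [show (0:Int) = ((0:Nat):Int) from by norm_num, PySem.List.pyGet?_natCast]; simp
  have e1 : PySem.List.pyGet? (w0 :: w1 :: ['\n'] :: w2 :: ['\n'] :: w3 :: w4 :: rest) (1:Int) = some w1 := by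
    rw [show (1:Int) = ((1:Nat):Int) from by norm_num, PySem.List.pyGet?_natCast]; simp
  have e2 : PySem.List.pyGet? (w0 :: w1 :: ['\n'] :: w2 :: ['\n'] :: w3 :: w4 :: rest) (2:Int) = some ['\n'] := by
    rw [show (2:Int) = ((2:Nat):Int) from by norm_num, PySem.List.pyGet?_natCast]; simp
  have e3 : PySem.List.pyGet? (w0 :: w1 :: ['\n'] :: w2 :: ['\n'] :: w3 :: w4 :: rest) (3:Int) = some w2 := by
    rw [show (3:Int) = ((3:Nat):Int) from by norm_num, PySem.List.pyGet?_natCast]; simp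
  have e4 : PySem.List.pyGet? (w0 :: w1 :: ['\n'] :: w2 :: ['\n'] :: w3 :: w4 :: rest) (4:Int) = some ['\n'] := by
    rw [show (4:Int) = ((4:Nat):Int) from by norm_num, PySem.List.pyGet?_natCast]; simp
  have e5 : PySem.List.pyGet? (w0 :: w1 :: ['\n'] :: w2 :: ['\n'] :: w3 :: w4 :: rest) (5:Int) = some w3 := by
    rw [show (5:Int) = ((5:Nat):Int) from by norm_num, PySem.List.pyGet?_natCast]; simp
  rw [e0, e1, e2, e3, e4, e5]
  simp only [Option.getD_some]
  have htail := pvLoopA5_tail (w0 :: w1 :: ['\n'] :: w2 :: ['\n'] :: w3 :: w4 :: rest)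
    (w4 :: rest) [w0, w1, ['\n'], w2, ['\n'], w3]
    ([] ++ w0 ++ [' '] ++ w1 ++ [' '] ++ ['\n'] ++ w2 ++ [' '] ++ ['\n'] ++ w3 ++ [' '])
    6 rfl (by simp) (by norm_num)
  simp only [L] at htail
  simp only [List.append_assoc, List.nil_append, List.cons_append] at htail ⊢
  rw [htail]

theorem pv_range4 : PySem.List.pyRange 0 4 1 = [0, 1, 2, 3] := by
  rw [PySem.List.pyRange_one_cons (by norm_num), PySem.List.pyRange_one_cons (by norm_num),
    PySem.List.pyRange_one_cons (by norm_num), PySem.List.pyRange_one_cons (by norm_num),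
    PySem.List.pyRange_one_eq_nil (by norm_num)]
  norm_num

theorem pv_range5 : PySem.List.pyRange 0 5 1 = [0, 1, 2, 3, 4] := by
  rw [PySem.List.pyRange_one_cons (by norm_num), PySem.List.pyRange_one_cons (by norm_num),
    PySem.List.pyRange_one_cons (by norm_num), PySem.List.pyRange_one_cons (by norm_num),
    PySem.List.pyRange_one_cons (by norm_num), PySem.List.pyRange_one_eq_nil (by norm_num)]
  norm_num

theorem pv_loopA3_eval3 (a b c : List Char) :
    pvLoopA3 [a, b, ['\n'], c] = a ++ [' '] ++ b ++ [' ', '\n'] ++ c := by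
  unfold pvLoopA3
  rw [show (([a, b, ['\n'], c] : List (List Char)).length : Int) = 4 from by norm_num, pv_range4]
  simp only [List.foldl_cons, List.foldl_nil]
  have e0 : PySem.List.pyGet? [a, b, ['\n'], c] (0:Int) = some a := by
    rw [show (0:Int) = ((0:Nat):Int) from by norm_num, PySem.List.pyGet?_natCast]; simp
  have e1 : PySem.List.pyGet? [a, b, ['\n'], c] (1:Int) = some b := by
    rw [show (1:Int) = ((1:Nat):Int) from by norm_num, PySem.List.pyGet?_natCast]; simp
  have e2 : PySem.List.pyGet? [a, b, ['\n'], c] (2:Int) = some ['\n'] := by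
    rw [show (2:Int) = ((2:Nat):Int) from by norm_num, PySem.List.pyGet?_natCast]; simp
  have e3 : PySem.List.pyGet? [a, b, ['\n'], c] (3:Int) = some c := by
    rw [show (3:Int) = ((3:Nat):Int) from by norm_num, PySem.List.pyGet?_natCast]; simp
  norm_num [e0, e1, e2, e3]
  simp

theorem pv_loopA3_eval4 (a b c d : List Char) :
    pvLoopA3 [a, b, ['\n'], c, d] = a ++ [' '] ++ b ++ [' ', '\n'] ++ c ++ [' '] ++ d := by
  unfold pvLoopA3
  rw [show (([a, b, ['\n'], c, d] : List (List Char)).length : Int) = 5 from by norm_num, pv_range5]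
  simp only [List.foldl_cons, List.foldl_nil]
  have e0 : PySem.List.pyGet? [a, b, ['\n'], c, d] (0:Int) = some a := by
    rw [show (0:Int) = ((0:Nat):Int) from by norm_num, PySem.List.pyGet?_natCast]; simp
  have e1 : PySem.List.pyGet? [a, b, ['\n'], c, d] (1:Int) = some b := by
    rw [show (1:Int) = ((1:Nat):Int) from by norm_num, PySem.List.pyGet?_natCast]; simp
  have e2 : PySem.List.pyGet? [a, b, ['\n'], c, d] (2:Int) = some ['\n'] := by
    rw [show (2:Int) = ((2:Nat):Int) from by norm_num, PySem.List.pyGet?_natCast]; simp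
  have e3 : PySem.List.pyGet? [a, b, ['\n'], c, d] (3:Int) = some c := by
    rw [show (3:Int) = ((3:Nat):Int) from by norm_num, PySem.List.pyGet?_natCast]; simp
  have e4 : PySem.List.pyGet? [a, b, ['\n'], c, d] (4:Int) = some d := by
    rw [show (4:Int) = ((4:Nat):Int) from by norm_num, PySem.List.pyGet?_natCast]; simp
  norm_num [e0, e1, e2, e3, e4]
  simp

-- ===== VERDICT (by name: the statement is the Claim_ definition above) =====
theorem ajustarNombreAsignatura_spec : Claim_equal_ajustarNombreAsignatura := by
  intro nombre _
  show ajustarNombreAsignatura nombre = ajustarNombreAsignatura_alt nombre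
  unfold ajustarNombreAsignatura ajustarNombreAsignatura_alt
  dsimp only []
  generalize PySem.Chars.split₀ nombre.toList = ws
  rcases ws with _ | ⟨a, _ | ⟨b, _ | ⟨c, _ | ⟨d, _ | ⟨e, rest⟩⟩⟩⟩⟩
  · norm_num
  · norm_num
  · norm_num
  · -- three words
    rw [if_neg (by norm_num), if_pos (by norm_num), if_neg (by norm_num), if_pos (by norm_num)]
    have hi : PySem.List.insert [a, b, c] 2 ['\n'] = [a, b, ['\n'], c] := by
      rw [PySem.List.insert_ofNat _ 2 _ (by norm_num)]; simp
    rw [hi, pv_loopA3_eval3]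
    rw [PySem.List.slice_to _ (show (0:Int) ≤ 2 from by norm_num), PySem.List.slice_from _ (show (0:Int) ≤ 2 from by norm_num)]
    norm_num [PySem.Chars.join_cons_cons, PySem.Chars.join_singleton]
    simp only [← String.ofList_append]
    congr 1
    simp [PySem.Chars.join_cons_cons, PySem.Chars.join_singleton, List.append_assoc]
  · -- four words
    rw [if_neg (by norm_num), if_pos (by norm_num), if_neg (by norm_num), if_pos (by norm_num)]
    have hi : PySem.List.insert [a, b, c, d] 2 ['\n'] = [a, b, ['\n'], c, d] := by
      rw [PySem.List.insert_ofNat _ 2 _ (by norm_num)]; simp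
    rw [hi, pv_loopA3_eval4]
    rw [PySem.List.slice_to _ (show (0:Int) ≤ 2 from by norm_num), PySem.List.slice_from _ (show (0:Int) ≤ 2 from by norm_num)]
    norm_num [PySem.Chars.join_cons_cons, PySem.Chars.join_singleton]
    simp only [← String.ofList_append]
    congr 1
    simp [PySem.Chars.join_cons_cons, PySem.Chars.join_singleton, List.append_assoc]
  · -- five or more words
    rw [if_pos (by simp), if_pos (by simp)]
    have hi1 : PySem.List.insert (a :: b :: c :: d :: e :: rest) 2 ['\n']
        = a :: b :: ['\n'] :: c :: d :: e :: rest := by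
      rw [PySem.List.insert_ofNat _ 2 _ (by simp)]; simp
    have hi2 : PySem.List.insert (a :: b :: ['\n'] :: c :: d :: e :: rest) 4 ['\n']
        = a :: b :: ['\n'] :: c :: ['\n'] :: d :: e :: rest := by
      rw [PySem.List.insert_ofNat _ 4 _ (by simp)]; simp
    rw [hi1, hi2, pv_loopA5_eval]
    rw [PySem.List.slice_to _ (show (0:Int) ≤ 2 from by norm_num), PySem.List.slice_from _ (show (0:Int) ≤ 3 from by norm_num)]
    have eg : PySem.List.pyGet? (a :: b :: c :: d :: e :: rest) (2:Int) = some c := by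
      rw [show (2:Int) = ((2:Nat):Int) from by norm_num, PySem.List.pyGet?_natCast]; simp
    rw [eg]
    norm_num [PySem.Chars.join_cons_cons, PySem.Chars.join_singleton]
    simp only [← String.ofList_append]
    congr 1
    simp [PySem.Chars.join_cons_cons, PySem.Chars.join_singleton, List.append_assoc]
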